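-- pv_equiv track=rewrite | github.com/AnnaDezsi/Algoritm | hashtab.py | generare_ht
-- ===== SOURCE A (Python) =====
-- def generare_ht(tip = 0):
--     ht = {}
--     litere = ["a" , "b" , "c" , "d" , "e" , "f" , "g" , "h" , "i" , "j", "k" , "l" , "m" , "n" , "o" , "p" , "q" , "r" , "s" , "t" ,
--           "u" , "v" , "w" , "x" , "y" , "z" ]
--     lista_noua = []
--     start = 6
--     for i in range(start, len(litere)):
--         lista_noua.append(litere[i])
--     for i in range(0, start):
--         lista_noua.append(litere[i])
--     for i in range(len(litere)):
--         if tip == 0: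
--             ht[litere[i]] = lista_noua[i]
--         else:
--             ht[lista_noua[i]] = litere[i]
--     return ht
-- ===== SOURCE B (Python) =====
-- def generare_ht(tip=0):
--     ht = {}
--     for i in range(26):
--         letter = chr(ord('a') + i)
--         shifted = chr(ord('a') + (i + 6) % 26)
--         if tip == 0:
--             ht[letter] = shifted
--         else:
--             ht[shifted] = letter
--     return ht
-- ===== Notes on version B (the rewrite author's own statement) =====
-- stated objective: simpler
-- what changed: Drops the hand-written letter list and the two rotation loops that build the shifted list; a single loop over the alphabet computes each letter and its shifted partner directly with chr/ord and modular arithmetic.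
import Mathlib
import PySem

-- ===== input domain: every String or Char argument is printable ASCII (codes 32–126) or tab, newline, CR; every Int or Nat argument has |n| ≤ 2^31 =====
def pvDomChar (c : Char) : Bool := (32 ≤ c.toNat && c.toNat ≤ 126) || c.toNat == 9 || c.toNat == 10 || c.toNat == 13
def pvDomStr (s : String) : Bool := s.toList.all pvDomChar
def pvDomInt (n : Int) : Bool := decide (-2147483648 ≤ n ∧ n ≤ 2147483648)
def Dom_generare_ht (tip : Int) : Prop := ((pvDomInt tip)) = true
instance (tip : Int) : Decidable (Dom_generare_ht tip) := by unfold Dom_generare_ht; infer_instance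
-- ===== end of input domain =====

set_option maxRecDepth 100000


-- B replaces the hand-built rotated list and its two copy loops by one loop computing each
-- shifted letter with chr/ord modular arithmetic (objective: simpler).

-- ===== PORT A =====
def generare_ht (tip : Int) : List (String × String) :=
  let ht : PySem.Dict String String := PySem.Dict.empty
  let litere : List String := ["a","b","c","d","e","f","g","h","i","j","k","l","m",
                               "n","o","p","q","r","s","t","u","v","w","x","y","z"]
  let lista_noua : List String := []
  let start : Int := 6
  let lista_noua := (PySem.List.pyRange start (litere.length : Int) 1).foldl
    (fun acc i => acc ++ [PySem.List.pyGetD litere i ""]) lista_noua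
  let lista_noua := (PySem.List.pyRange 0 start 1).foldl
    (fun acc i => acc ++ [PySem.List.pyGetD litere i ""]) lista_noua
  let ht := (PySem.List.pyRange 0 (litere.length : Int) 1).foldl
    (fun ht i =>
      if tip == 0 then
        ht.insert (PySem.List.pyGetD litere i "") (PySem.List.pyGetD lista_noua i "")
      else
        ht.insert (PySem.List.pyGetD lista_noua i "") (PySem.List.pyGetD litere i "")) ht
  ht.items

-- ===== PORT B =====
def generare_ht_alt (tip : Int) : List (String × String) :=
  let ht := (PySem.List.pyRange 0 26 1).foldl
    (fun (ht : PySem.Dict String String) i =>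
      let letter := String.ofList [Char.ofNat (97 + i.toNat)]
      let shifted := String.ofList [Char.ofNat (97 + (i.toNat + 6) % 26)]
      if tip == 0 then ht.insert letter shifted else ht.insert shifted letter) PySem.Dict.empty
  ht.items

-- ===== PRECONDITION & SPEC =====
def Spec_generare_ht (tip : Int) (out : List (String × String)) : Prop := out = generare_ht_alt tip
instance (tip : Int) (out : List (String × String)) : Decidable (Spec_generare_ht tip out) := by unfold Spec_generare_ht; infer_instance

-- ===== CLAIM (what is proved, stated in full; the proofs are below) =====
def Claim_equal_generare_ht : Prop := ∀ (tip : Int), Dom_generare_ht tip → Spec_generare_ht tip (generare_ht tip)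

-- ===== LEMMAS AND PROOFS =====
theorem generare_ht_eq_of_ne (tip : Int) (h : tip ≠ 0) : generare_ht tip = generare_ht 1 := by
  have h1 : (tip == 0) = false := by simp [h]
  simp only [generare_ht, h1]
  decide

theorem generare_ht_alt_eq_of_ne (tip : Int) (h : tip ≠ 0) : generare_ht_alt tip = generare_ht_alt 1 := by
  have h1 : (tip == 0) = false := by simp [h]
  simp only [generare_ht_alt, h1]
  decide

-- ===== VERDICT (by name: the statement is the Claim_ definition above) =====
theorem generare_ht_spec : Claim_equal_generare_ht := by
  intro tip _
  unfold Spec_generare_ht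
  by_cases h : tip = 0
  · subst h; decide
  · rw [generare_ht_eq_of_ne tip h, generare_ht_alt_eq_of_ne tip h]; decide
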